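-- pv_equiv track=rewrite | github.com/zssjh/ArrangementNet | evaluation/utils.py | get_line_face_connections
-- ===== SOURCE A (Python) =====
-- def get_line_face_connections(arrobj, floor_label):
--     tris = arrobj['F']
--     line_count = 0
--     line_to_face = {}
--     face_to_line = {}
--     for i, tri in enumerate(tris):
--         if floor_label[i] == 0:
--             line_count += 3
--             continue
--         face_to_line[i] = []
--         for j in range(3):
--             face_to_line[i].append(line_count)
--             line_to_face[line_count] = i
--             line_count += 1
--     return face_to_line, line_to_face
-- ===== SOURCE B (Python) =====
-- def get_line_face_connections(arrobj, floor_label):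
--     # Line-centric, two-stage: iterate over the 3*n LINE indices (not the faces),
--     # build line_to_face first, then derive face_to_line by grouping its items.
--     n = len(arrobj['F'])
--     line_to_face = {L: L // 3 for L in range(3 * n) if floor_label[L // 3] != 0}
--     face_to_line = {}
--     for L, f in line_to_face.items():
--         face_to_line.setdefault(f, []).append(L)
--     return face_to_line, line_to_face
-- ===== Notes on version B (the rewrite author's own statement) =====
-- stated objective: alternative
-- what changed: B is line-centric and two-stage instead of A's face-centric single pass: it first builds line_to_face by a comprehension over all 3*n line indices (face recovered as L//3, masked lines filtered out), then derives face_to_line by grouping line_to_face's items, instead of A's nested face loop with a running line counter.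
import Mathlib
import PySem

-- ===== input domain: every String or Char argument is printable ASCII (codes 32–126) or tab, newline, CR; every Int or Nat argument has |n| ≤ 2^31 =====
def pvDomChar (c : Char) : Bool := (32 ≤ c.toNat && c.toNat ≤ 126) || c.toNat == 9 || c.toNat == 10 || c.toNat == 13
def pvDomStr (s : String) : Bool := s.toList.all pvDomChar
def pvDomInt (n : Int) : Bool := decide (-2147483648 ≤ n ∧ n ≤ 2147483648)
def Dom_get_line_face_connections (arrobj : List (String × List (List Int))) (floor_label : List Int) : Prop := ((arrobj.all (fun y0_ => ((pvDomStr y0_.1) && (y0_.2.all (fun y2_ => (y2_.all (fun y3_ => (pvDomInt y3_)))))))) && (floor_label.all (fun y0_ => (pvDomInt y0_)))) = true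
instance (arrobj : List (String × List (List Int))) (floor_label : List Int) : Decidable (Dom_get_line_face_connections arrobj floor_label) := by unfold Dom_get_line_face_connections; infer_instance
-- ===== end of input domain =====

-- B is line-centric and two-stage instead of A's face-centric counter loop: it first builds
-- line_to_face over all 3*n line indices (face = L//3, masked lines filtered), then derives
-- face_to_line by grouping its items; same output, objective: alternative.


-- ===== PORT A =====
-- inner `for j in range(3)`: append line_count to face_to_line[i], line_to_face[line_count] = i, line_count += 1
def pvA_inner (i : Int) (st : Int × PySem.Dict Int (List Int) × PySem.Dict Int Int) :
    Int × PySem.Dict Int (List Int) × PySem.Dict Int Int :=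
  (PySem.List.pyRange 0 3).foldl
    (fun st2 _j => (st2.1 + 1, st2.2.1.modify i [] (· ++ [st2.1]), st2.2.2.insert st2.1 i)) st

-- one iteration of `for i, tri in enumerate(tris)` (tri itself is unused by the body)
def pvA_step (floor_label : List Int) (st : Int × PySem.Dict Int (List Int) × PySem.Dict Int Int)
    (p : Int × List Int) : Int × PySem.Dict Int (List Int) × PySem.Dict Int Int :=
  -- floor_label[p.1]: IndexError (pyGet? = none) excluded by Pre_, default never read there
  if (PySem.List.pyGet? floor_label p.1).getD 0 == 0 then (st.1 + 3, st.2)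
  else pvA_inner p.1 (st.1, st.2.1.insert p.1 [], st.2.2)

def get_line_face_connections (arrobj : List (String × List (List Int))) (floor_label : List Int) :
    (List (Int × List Int)) × (List (Int × Int)) :=
  -- arrobj['F']: KeyError excluded by Pre_, the [] default is never read there
  let tris := (PySem.Dict.mk arrobj).getD "F" []
  let st := (PySem.List.enumerate tris).foldl (pvA_step floor_label)
    (0, PySem.Dict.empty, PySem.Dict.empty)
  (st.2.1.items, st.2.2.items)

-- ===== PORT B =====
-- one line index L of the comprehension {L: L // 3 for L in range(3*n) if floor_label[L // 3] != 0}
def pvB1_step (floor_label : List Int) (d : PySem.Dict Int Int) (L : Int) : PySem.Dict Int Int :=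
  if (PySem.List.pyGet? floor_label (PySem.Int.floordiv L 3)).getD 0 != 0 then
    d.insert L (PySem.Int.floordiv L 3)
  else d

-- `face_to_line.setdefault(f, []).append(L)` = modify f with default [] appending L
def pvB2_step (d : PySem.Dict Int (List Int)) (p : Int × Int) : PySem.Dict Int (List Int) :=
  d.modify p.2 [] (· ++ [p.1])

def get_line_face_connections_alt (arrobj : List (String × List (List Int))) (floor_label : List Int) :
    (List (Int × List Int)) × (List (Int × Int)) :=
  let tris := (PySem.Dict.mk arrobj).getD "F" []
  let n : Int := (tris.length : Int)
  let line_to_face := (PySem.List.pyRange 0 (3 * n)).foldl (pvB1_step floor_label) PySem.Dict.empty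
  let face_to_line := line_to_face.items.foldl pvB2_step PySem.Dict.empty
  (face_to_line.items, line_to_face.items)

-- ===== PRECONDITION & SPEC =====
-- Pre_ excludes exactly the inputs where Python A raises: KeyError ('F' missing from arrobj)
-- and IndexError (floor_label shorter than the triangle list).
def Pre_get_line_face_connections (arrobj : List (String × List (List Int))) (floor_label : List Int) : Prop :=
  ((PySem.Dict.mk arrobj).get? "F").isSome = true ∧
  ((PySem.Dict.mk arrobj).getD "F" []).length ≤ floor_label.length
instance (arrobj : List (String × List (List Int))) (floor_label : List Int) : Decidable (Pre_get_line_face_connections arrobj floor_label) := by unfold Pre_get_line_face_connections; infer_instance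

def pvWitness_get_line_face_connections : (List (String × List (List Int))) × List Int :=
  ([("F", [[0, 1, 2], [0, 2, 3]])], [1, 0])

def Spec_get_line_face_connections (arrobj : List (String × List (List Int))) (floor_label : List Int) (out : (List (Int × List Int)) × (List (Int × Int))) : Prop := out = get_line_face_connections_alt arrobj floor_label
instance (arrobj : List (String × List (List Int))) (floor_label : List Int) (out : (List (Int × List Int)) × (List (Int × Int))) : Decidable (Spec_get_line_face_connections arrobj floor_label out) := by unfold Spec_get_line_face_connections; infer_instance

-- ===== CLAIM (what is proved, stated in full; the proofs are below) =====
def Claim_equal_get_line_face_connections : Prop := ∀ (arrobj : List (String × List (List Int))) (floor_label : List Int), Dom_get_line_face_connections arrobj floor_label → Pre_get_line_face_connections arrobj floor_label → Spec_get_line_face_connections arrobj floor_label (get_line_face_connections arrobj floor_label)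

-- ===== LEMMAS AND PROOFS =====

-- proof-side closed-form step on each map, shared reference point of both programs
def pvCond (fl : List Int) (i : Int) : Bool := (PySem.List.pyGet? fl i).getD 0 == 0
def pvGF (fl : List Int) (d : PySem.Dict Int (List Int)) (i : Int) : PySem.Dict Int (List Int) :=
  if pvCond fl i then d else d.insert i [3 * i, 3 * i + 1, 3 * i + 2]
def pvGL (fl : List Int) (d : PySem.Dict Int Int) (i : Int) : PySem.Dict Int Int :=
  if pvCond fl i then d else ((d.insert (3 * i) i).insert (3 * i + 1) i).insert (3 * i + 2) i

theorem pvGF_pos (fl : List Int) (d : PySem.Dict Int (List Int)) (i : Int) (hc : pvCond fl i = true) :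
    pvGF fl d i = d := by unfold pvGF; rw [if_pos hc]
theorem pvGF_neg (fl : List Int) (d : PySem.Dict Int (List Int)) (i : Int) (hc : ¬ pvCond fl i = true) :
    pvGF fl d i = d.insert i [3 * i, 3 * i + 1, 3 * i + 2] := by unfold pvGF; rw [if_neg hc]
theorem pvGL_pos (fl : List Int) (d : PySem.Dict Int Int) (i : Int) (hc : pvCond fl i = true) :
    pvGL fl d i = d := by unfold pvGL; rw [if_pos hc]
theorem pvGL_neg (fl : List Int) (d : PySem.Dict Int Int) (i : Int) (hc : ¬ pvCond fl i = true) :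
    pvGL fl d i = ((d.insert (3 * i) i).insert (3 * i + 1) i).insert (3 * i + 2) i := by
  unfold pvGL; rw [if_neg hc]

theorem pvStepA_eq (fl : List Int) (i : Int) (f2l : PySem.Dict Int (List Int)) (l2f : PySem.Dict Int Int)
    (t : List Int) :
    pvA_step fl (3 * i, f2l, l2f) (i, t) = (3 * (i + 1), pvGF fl f2l i, pvGL fl l2f i) := by
  have h3 : PySem.List.pyRange 0 3 = [0, 1, 2] := by decide
  unfold pvA_step pvA_inner pvGF pvGL pvCond
  split_ifs with h
  · simp; ring
  · simp only [h3, List.foldl,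
      PySem.Dict.modify, PySem.Dict.getD_insert_self, PySem.Dict.insert_insert_self]
    rw [show (3 * i + 1 + 1 : Int) = 3 * i + 2 from by ring,
        show (3 * i + 2 + 1 : Int) = 3 * (i + 1) from by ring,
        show (([] ++ [3 * i] ++ [3 * i + 1] ++ [3 * i + 2]) : List Int)
          = [3 * i, 3 * i + 1, 3 * i + 2] from by simp]

theorem pvFoldA (fl : List Int) :
    ∀ (ts : List (List Int)) (n : Int) (f2l : PySem.Dict Int (List Int)) (l2f : PySem.Dict Int Int),
    (PySem.List.enumerate ts n).foldl (pvA_step fl) (3 * n, f2l, l2f) =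
      (3 * (n + ts.length),
       (PySem.List.pyRange n (n + ts.length)).foldl (pvGF fl) f2l,
       (PySem.List.pyRange n (n + ts.length)).foldl (pvGL fl) l2f) := by
  intro ts
  induction ts with
  | nil =>
    intro n f2l l2f
    simp [PySem.List.enumerate, PySem.List.pyRange_one_eq_nil (le_refl n)]
  | cons t ts ih =>
    intro n f2l l2f
    have hlt : n < n + ((t :: ts).length : Int) := by simp
    rw [PySem.List.pyRange_one_cons hlt]
    show ((n, t) :: PySem.List.enumerate ts (n + 1)).foldl (pvA_step fl) (3 * n, f2l, l2f) = _
    simp only [List.foldl]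
    rw [pvStepA_eq, ih (n + 1) (pvGF fl f2l n) (pvGL fl l2f n)]
    have hc : n + 1 + (ts.length : Int) = n + ((t :: ts).length : Int) := by
      simp only [List.length_cons]; push_cast; ring
    rw [hc]

-- pyRange 0 (3m) splits into blocks of three consecutive line indices
theorem pvChunk : ∀ (m : Nat), PySem.List.pyRange 0 (3 * (m : Int)) =
    (PySem.List.pyRange 0 (m : Int)).flatMap (fun i => [3 * i, 3 * i + 1, 3 * i + 2]) := by
  intro m
  induction m with
  | zero => simp [PySem.List.pyRange_one_eq_nil]
  | succ m ih =>
    rw [show ((m + 1 : Nat) : Int) = (m : Int) + 1 from by push_cast; ring,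
        show (3 : Int) * ((m : Int) + 1) = 3 * (m : Int) + 1 + 1 + 1 from by ring,
        PySem.List.pyRange_one_succ_right (by omega : (0:Int) ≤ 3 * (m:Int) + 1 + 1),
        PySem.List.pyRange_one_succ_right (by omega : (0:Int) ≤ 3 * (m:Int) + 1),
        PySem.List.pyRange_one_succ_right (by omega : (0:Int) ≤ 3 * (m:Int)),
        PySem.List.pyRange_one_succ_right (by omega : (0:Int) ≤ (m:Int)),
        List.flatMap_append, ih]
    simp
    omega

theorem pvFoldFlat {α β γ : Type} (g : γ → β → γ) (f : α → List β) :
    ∀ (l : List α) (init : γ),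
    (l.flatMap f).foldl g init = l.foldl (fun acc a => (f a).foldl g acc) init := by
  intro l
  induction l with
  | nil => intro init; rfl
  | cons x xs ih => intro init; simp only [List.flatMap_cons, List.foldl_append, List.foldl, ih]

theorem pvB1_block (fl : List Int) (d : PySem.Dict Int Int) (i : Int) :
    ([3 * i, 3 * i + 1, 3 * i + 2]).foldl (pvB1_step fl) d = pvGL fl d i := by
  have h0 : PySem.Int.floordiv (3 * i) 3 = i := by
    rw [PySem.Int.floordiv_eq_iff_of_pos (by norm_num)]; omega
  have h1 : PySem.Int.floordiv (3 * i + 1) 3 = i := by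
    rw [PySem.Int.floordiv_eq_iff_of_pos (by norm_num)]; omega
  have h2 : PySem.Int.floordiv (3 * i + 2) 3 = i := by
    rw [PySem.Int.floordiv_eq_iff_of_pos (by norm_num)]; omega
  simp only [List.foldl, pvB1_step, h0, h1, h2]
  by_cases hc : (PySem.List.pyGet? fl i).getD 0 = 0
  · simp [pvGL, pvCond, hc]
  · simp [pvGL, pvCond, hc]

-- B's first pass is the closed-form per-face fold
theorem pvPass1 (fl : List Int) (m : Nat) :
    (PySem.List.pyRange 0 (3 * (m : Int))).foldl (pvB1_step fl) PySem.Dict.empty =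
      (PySem.List.pyRange 0 (m : Int)).foldl (pvGL fl) PySem.Dict.empty := by
  rw [pvChunk m, pvFoldFlat]
  simp only [pvB1_block]

-- the explicit items list of the line_to_face dict after m faces
def pvItemsSpec (fl : List Int) (m : Nat) : List (Int × Int) :=
  (PySem.List.pyRange 0 (m : Int)).flatMap
    (fun i => if pvCond fl i then [] else [(3 * i, i), (3 * i + 1, i), (3 * i + 2, i)])

theorem pvSpec_key_lt (fl : List Int) (m : Nat) :
    ∀ p ∈ pvItemsSpec fl m, 0 ≤ p.1 ∧ p.1 < 3 * (m : Int) := by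
  intro p hp
  unfold pvItemsSpec at hp
  obtain ⟨i, hi, hpi⟩ := List.mem_flatMap.mp hp
  rw [PySem.List.mem_pyRange_one] at hi
  split_ifs at hpi with hc
  · simp at hpi
  · simp only [List.mem_cons] at hpi
    rcases hpi with h | h | h | h <;> first | (subst h; constructor <;> omega) | simp at h

theorem pvItemsSpec_succ (fl : List Int) (m : Nat) :
    pvItemsSpec fl (m + 1) = pvItemsSpec fl m ++
      (if pvCond fl (m : Int) then [] else [(3 * (m:Int), (m:Int)), (3 * (m:Int) + 1, (m:Int)), (3 * (m:Int) + 2, (m:Int))]) := by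
  unfold pvItemsSpec
  rw [show ((m + 1 : Nat) : Int) = (m : Int) + 1 from by push_cast; ring,
      PySem.List.pyRange_one_succ_right (by omega : (0:Int) ≤ (m:Int)),
      List.flatMap_append]
  simp

theorem pvL_items (fl : List Int) : ∀ (m : Nat),
    ((PySem.List.pyRange 0 (m : Int)).foldl (pvGL fl) PySem.Dict.empty).items = pvItemsSpec fl m := by
  intro m
  induction m with
  | zero =>
    rw [show ((0:Nat):Int) = 0 from rfl, PySem.List.pyRange_one_eq_nil (le_refl 0)]
    rfl
  | succ m ih =>
    rw [show ((m + 1 : Nat) : Int) = (m : Int) + 1 from by push_cast; ring,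
        PySem.List.pyRange_one_succ_right (by omega : (0:Int) ≤ (m:Int)),
        List.foldl_append, pvItemsSpec_succ]
    simp only [List.foldl]
    have hkey : ∀ k : Int, 3 * (m : Int) ≤ k →
        ((PySem.List.pyRange 0 (m : Int)).foldl (pvGL fl) PySem.Dict.empty).contains k = false := by
      intro k hk
      rw [PySem.Dict.contains_eq_decide_mem_keys]
      simp only [decide_eq_false_iff_not]
      intro hmem
      have : k ∈ (pvItemsSpec fl m).map Prod.fst := by
        simpa [PySem.Dict.keys, ih] using hmem
      obtain ⟨p, hp, hpk⟩ := List.mem_map.mp this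
      have := pvSpec_key_lt fl m p hp
      omega
    by_cases hc : pvCond fl (m : Int) = true
    · rw [pvGL_pos fl _ _ hc, if_pos hc, ih, List.append_nil]
    · have c0 : ((PySem.List.pyRange 0 (m : Int)).foldl (pvGL fl) PySem.Dict.empty).contains (3 * (m:Int)) = false :=
        hkey _ (by omega)
      have c1 : (((PySem.List.pyRange 0 (m : Int)).foldl (pvGL fl) PySem.Dict.empty).insert (3 * (m:Int)) (m:Int)).contains (3 * (m:Int) + 1) = false := by
        rw [PySem.Dict.contains_insert, hkey _ (by omega)]
        simp
      have c2 : ((((PySem.List.pyRange 0 (m : Int)).foldl (pvGL fl) PySem.Dict.empty).insert (3 * (m:Int)) (m:Int)).insert (3 * (m:Int) + 1) (m:Int)).contains (3 * (m:Int) + 2) = false := by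
        rw [PySem.Dict.contains_insert, PySem.Dict.contains_insert, hkey _ (by omega)]
        simp
      rw [pvGL_neg fl _ _ hc, if_neg hc,
          PySem.Dict.items_insert_of_not_contains _ _ c2,
          PySem.Dict.items_insert_of_not_contains _ _ c1,
          PySem.Dict.items_insert_of_not_contains _ _ c0, ih]
      simp

theorem pvF_not_contains (fl : List Int) : ∀ (m : Nat) (j : Int), (m : Int) ≤ j →
    ((PySem.List.pyRange 0 (m : Int)).foldl (pvGF fl) PySem.Dict.empty).contains j = false := by
  intro m
  induction m with
  | zero => intro j _; simp [PySem.List.pyRange_one_eq_nil]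
  | succ m ih =>
    intro j hj
    rw [show ((m + 1 : Nat) : Int) = (m : Int) + 1 from by push_cast; ring,
        PySem.List.pyRange_one_succ_right (by omega : (0:Int) ≤ (m:Int)),
        List.foldl_append]
    simp only [List.foldl]
    have hmj : (m : Int) ≤ j := by omega
    by_cases hc : pvCond fl (m : Int) = true
    · rw [pvGF_pos fl _ _ hc]
      exact ih j hmj
    · rw [pvGF_neg fl _ _ hc, PySem.Dict.contains_insert, ih j hmj]
      simp; omega

-- B's second pass (grouping) rebuilds exactly A's face_to_line fold
theorem pvPass2 (fl : List Int) : ∀ (m : Nat),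
    (pvItemsSpec fl m).foldl pvB2_step PySem.Dict.empty =
      (PySem.List.pyRange 0 (m : Int)).foldl (pvGF fl) PySem.Dict.empty := by
  intro m
  induction m with
  | zero => simp [pvItemsSpec, PySem.List.pyRange_one_eq_nil]
  | succ m ih =>
    rw [pvItemsSpec_succ, List.foldl_append,
        show ((m + 1 : Nat) : Int) = (m : Int) + 1 from by push_cast; ring,
        PySem.List.pyRange_one_succ_right (by omega : (0:Int) ≤ (m:Int)),
        List.foldl_append, ih]
    simp only [List.foldl]
    have hnc : ((PySem.List.pyRange 0 (m : Int)).foldl (pvGF fl) PySem.Dict.empty).contains (m : Int) = false :=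
      pvF_not_contains fl m (m : Int) (le_refl _)
    by_cases hc : pvCond fl (m : Int) = true
    · rw [if_pos hc, pvGF_pos fl _ _ hc]
      rfl
    · rw [if_neg hc, pvGF_neg fl _ _ hc]
      simp only [List.foldl, pvB2_step,
        PySem.Dict.modify, PySem.Dict.getD_insert_self, PySem.Dict.insert_insert_self]
      rw [PySem.Dict.getD_of_not_contains _ _ hnc]
      simp

-- ===== VERDICT (by name: the statement is the Claim_ definition above) =====
theorem get_line_face_connections_spec : Claim_equal_get_line_face_connections := by
  unfold Claim_equal_get_line_face_connections
  intro arrobj floor_label _ _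
  unfold Spec_get_line_face_connections get_line_face_connections get_line_face_connections_alt
  dsimp only
  have hA := pvFoldA floor_label ((PySem.Dict.mk arrobj).getD "F" []) 0 PySem.Dict.empty PySem.Dict.empty
  norm_num at hA
  rw [show PySem.List.enumerate ((PySem.Dict.mk arrobj).getD "F" []) =
        PySem.List.enumerate ((PySem.Dict.mk arrobj).getD "F" []) 0 from rfl, hA]
  rw [pvPass1 floor_label ((PySem.Dict.mk arrobj).getD "F" []).length,
      pvL_items floor_label, pvPass2 floor_label]
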